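-- pv_equiv track=rewrite | github.com/hao0710/COMP9021 | quiz/quiz_3.py | triangles_towards_North
-- ===== SOURCE A (Python) =====
-- def triangles_towards_North(grid_new):
--     result = list()
--     pair = dict()
--     for i in range(len(grid_new) - 1):
--         for j in range(1, len(grid_new) - 1):
--             temp = 0
--             if grid_new[i][j] >= 1:
--                 for k in range(1, 1 + min(j, len(grid_new) - 1 - i, len(grid_new) - 1 - j)):
--                     if 0 not in grid_new[i + k][j - k:j + k + 1]:
--                         temp += 1
--                         if k < min(j, len(grid_new) - i - 1, len(grid_new) - j - 1):
--                             continue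
--                     if temp == 0:
--                         break
--                     else:
--                         size = temp + 1
--                         if size in pair.keys():
--                             pair[size] += 1
--                         else:
--                             pair[size] = 1
--                         break
--     for size, num in pair.items():
--         result.append((size, num))
--     result.sort(reverse=True)
--     return result
-- ===== SOURCE B (Python) =====
-- def triangles_towards_North(grid_new):
--     n = len(grid_new)
--     # one prefix-sum table of zero-counts per row: zeros in row[lo:hi] in O(1)
--     prefs = []
--     for row in grid_new:
--         p = [0]
--         for x in row:
--             p.append(p[-1] + (1 if x == 0 else 0))
--         prefs.append(p)
--     count = {}
--     for i in range(n - 1):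
--         for j in range(1, n - 1):
--             if grid_new[i][j] >= 1:
--                 kmax = min(j, n - 1 - i, n - 1 - j)
--                 k = 0
--                 while k < kmax:
--                     p = prefs[i + k + 1]
--                     m = len(p) - 1
--                     lo = min(j - k - 1, m)
--                     hi = min(j + k + 2, m)
--                     if p[hi] - p[lo] > 0:
--                         break
--                     k += 1
--                 if k > 0:
--                     count[k + 1] = count.get(k + 1, 0) + 1
--     return sorted(count.items(), reverse=True)
-- ===== Notes on version B (the rewrite author's own statement) =====
-- stated objective: faster
-- what changed: B precomputes one prefix-sum table of zero counts per row so each 'does this row segment contain a zero' test is O(1) instead of an O(n) slice scan, grows each triangle with a plain while loop and counts sizes with dict.get, returning sorted(count.items(), reverse=True).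
import Mathlib
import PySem

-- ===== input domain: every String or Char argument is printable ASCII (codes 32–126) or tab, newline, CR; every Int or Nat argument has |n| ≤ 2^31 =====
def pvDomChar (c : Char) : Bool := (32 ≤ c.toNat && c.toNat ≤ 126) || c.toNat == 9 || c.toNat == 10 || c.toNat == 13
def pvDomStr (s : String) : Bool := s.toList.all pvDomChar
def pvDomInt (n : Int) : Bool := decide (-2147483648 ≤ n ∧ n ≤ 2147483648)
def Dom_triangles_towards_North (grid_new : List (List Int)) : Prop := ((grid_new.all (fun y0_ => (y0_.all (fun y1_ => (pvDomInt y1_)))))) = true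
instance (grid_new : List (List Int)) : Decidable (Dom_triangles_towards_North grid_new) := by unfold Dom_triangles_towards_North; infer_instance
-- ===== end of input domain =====

-- B replaces A's repeated O(n) slice scans by per-row prefix sums of zero counts (O(1) segment
-- queries while growing each triangle); equivalence is claimed on Pre_ (grids where A does not raise).

-- ===== PORT A =====
-- pair[size] += 1 / pair[size] = 1, guarded by 'size in pair.keys()'
def pvRecordA (pair : PySem.Dict Int Int) (size : Int) : PySem.Dict Int Int :=
  if pair.contains size then pair.insert size (pair.getD size 0 + 1)
  else pair.insert size 1

-- the 'for k in range(1, 1 + min(...))' loop with its continue/break, threading temp and pair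
def pvInnerA (g : List (List Int)) (i j : Int) (ks : List Int) (temp : Int)
    (pair : PySem.Dict Int Int) : PySem.Dict Int Int :=
  match ks with
  | [] => pair
  | k :: rest =>
    if (0 : Int) ∉ PySem.List.slice (PySem.List.pyGetD g (i + k) [])
        (some (j - k)) (some (j + k + 1)) then
      let temp' := temp + 1
      if k < min j (min ((g.length : Int) - i - 1) ((g.length : Int) - j - 1)) then
        pvInnerA g i j rest temp' pair
      else
        if temp' = 0 then pair else pvRecordA pair (temp' + 1)
    else
      if temp = 0 then pair else pvRecordA pair (temp + 1)

def triangles_towards_North (grid_new : List (List Int)) : List (Int × Int) :=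
  let pair : PySem.Dict Int Int :=
    (PySem.List.pyRange 0 ((grid_new.length : Int) - 1) 1).foldl (fun pair i =>
      (PySem.List.pyRange 1 ((grid_new.length : Int) - 1) 1).foldl (fun pair j =>
        if 1 ≤ PySem.List.pyGetD (PySem.List.pyGetD grid_new i []) j 0 then
          pvInnerA grid_new i j
            (PySem.List.pyRange 1
              (1 + min j (min ((grid_new.length : Int) - 1 - i) ((grid_new.length : Int) - 1 - j))) 1)
            0 pair
        else pair) pair) PySem.Dict.empty
  let result : List (Int × Int) := pair.items.foldl (fun r sn => r ++ [sn]) []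
  PySem.List.sorted2 result (fun x => x.1) (fun x => x.2) true

-- ===== PORT B =====
-- p = [0]; for x in row: p.append(p[-1] + (1 if x == 0 else 0))
def pvPref (row : List Int) : List Int :=
  row.foldl (fun p x => p ++ [PySem.List.pyGetD p (-1) 0 + (if x = 0 then 1 else 0)]) [0]

-- the while loop: grow k while the queried segment contains no zero
def pvWhileB (prefs : List (List Int)) (i j kmax k : Int) (fuel : Nat) : Int :=
  match fuel with
  | 0 => k
  | fuel + 1 =>
    if k < kmax then
      let p := PySem.List.pyGetD prefs (i + k + 1) []
      let m : Int := (p.length : Int) - 1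
      let lo := min (j - k - 1) m
      let hi := min (j + k + 2) m
      if 0 < PySem.List.pyGetD p hi 0 - PySem.List.pyGetD p lo 0 then k
      else pvWhileB prefs i j kmax (k + 1) fuel
    else k

def triangles_towards_North_alt (grid_new : List (List Int)) : List (Int × Int) :=
  let n : Int := grid_new.length
  let prefs : List (List Int) := grid_new.foldl (fun ps row => ps ++ [pvPref row]) []
  let count : PySem.Dict Int Int :=
    (PySem.List.pyRange 0 (n - 1) 1).foldl (fun cnt i =>
      (PySem.List.pyRange 1 (n - 1) 1).foldl (fun cnt j =>
        if 1 ≤ PySem.List.pyGetD (PySem.List.pyGetD grid_new i []) j 0 then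
          let kmax := min j (min (n - 1 - i) (n - 1 - j))
          let k := pvWhileB prefs i j kmax 0 kmax.toNat
          if 0 < k then cnt.insert (k + 1) (cnt.getD (k + 1) 0 + 1) else cnt
        else cnt) cnt) PySem.Dict.empty
  PySem.List.sorted2 count.items (fun x => x.1) (fun x => x.2) true

-- ===== PRECONDITION & SPEC =====
-- Pre_ excludes exactly the grids on which A raises IndexError: with n ≥ 3 rows, grid_new[i][j]
-- is read for every i ≤ n-2 and j ≤ n-2, so every row except possibly the last needs length ≥ n-1.
def Pre_triangles_towards_North (grid_new : List (List Int)) : Prop :=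
  grid_new.length ≤ 2 ∨ ∀ r ∈ grid_new.dropLast, grid_new.length - 1 ≤ r.length
instance (grid_new : List (List Int)) : Decidable (Pre_triangles_towards_North grid_new) := by
  unfold Pre_triangles_towards_North; infer_instance

def pvWitness_triangles_towards_North : List (List Int) :=
  [[0, 1, 2], [1, 1, 1], [1, 0, 1]]

def Spec_triangles_towards_North (grid_new : List (List Int)) (out : List (Int × Int)) : Prop :=
  out = triangles_towards_North_alt grid_new
instance (grid_new : List (List Int)) (out : List (Int × Int)) :
    Decidable (Spec_triangles_towards_North grid_new out) := by
  unfold Spec_triangles_towards_North; infer_instance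

-- ===== CLAIM (what is proved, stated in full; the proofs are below) =====
def Claim_equal_triangles_towards_North : Prop :=
  ∀ (grid_new : List (List Int)), Dom_triangles_towards_North grid_new →
    Pre_triangles_towards_North grid_new →
    Spec_triangles_towards_North grid_new (triangles_towards_North grid_new)

-- ===== LEMMAS AND PROOFS =====

-- append-only folds, characterised
theorem pv_foldl_pref (l acc : List (List Int)) :
    l.foldl (fun ps row => ps ++ [pvPref row]) acc = acc ++ l.map pvPref := by
  induction l generalizing acc with
  | nil => simp
  | cons x xs ih => simp [ih]

theorem pv_foldl_snoc (l acc : List (Int × Int)) :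
    l.foldl (fun r sn => r ++ [sn]) acc = acc ++ l := by
  induction l generalizing acc with
  | nil => simp
  | cons x xs ih => simp [ih]

-- one controlled step of the while loop
theorem pvWhileB_zero (prefs : List (List Int)) (i j kmax k : Int) :
    pvWhileB prefs i j kmax k 0 = k := rfl

theorem pvWhileB_succ (prefs : List (List Int)) (i j kmax k : Int) (fuel : Nat) :
    pvWhileB prefs i j kmax k (fuel + 1) =
      if k < kmax then
        (if 0 < PySem.List.pyGetD (PySem.List.pyGetD prefs (i + k + 1) [])
              (min (j + k + 2) (((PySem.List.pyGetD prefs (i + k + 1) []).length : Int) - 1)) 0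
            - PySem.List.pyGetD (PySem.List.pyGetD prefs (i + k + 1) [])
              (min (j - k - 1) (((PySem.List.pyGetD prefs (i + k + 1) []).length : Int) - 1)) 0
         then k else pvWhileB prefs i j kmax (k + 1) fuel)
      else k := rfl

-- the prefix-building loop of B, characterised
theorem pvPref_foldl (row p : List Int) (c : Int) :
    row.foldl (fun p x => p ++ [PySem.List.pyGetD p (-1) 0 + (if x = 0 then 1 else 0)]) (p ++ [c])
      = p ++ (List.range (row.length + 1)).map (fun m => c + ((row.take m).count 0 : Int)) := by
  induction row generalizing p c with
  | nil => simp [List.range_one]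
  | cons x xs ih =>
    have hsplit : (List.range (xs.length + 1 + 1)).map
          (fun m => c + (((x :: xs).take m).count 0 : Int))
        = c :: (List.range (xs.length + 1)).map
          (fun m => (c + if x = 0 then 1 else 0) + ((xs.take m).count 0 : Int)) := by
      rw [List.range_succ_eq_map, List.map_cons, List.map_map]
      congr 1
      · simp
      · apply List.map_congr_left
        intro m _
        simp only [Function.comp_apply, Nat.succ_eq_add_one, List.take_succ_cons,
          List.count_cons, beq_iff_eq]
        push_cast
        split_ifs <;> omega
    rw [List.foldl_cons]
    simp only [PySem.List.pyGetD_neg_one_append_singleton]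
    rw [ih, List.length_cons, hsplit]
    simp

theorem pvPref_eq (row : List Int) :
    pvPref row = (List.range (row.length + 1)).map (fun m => ((row.take m).count 0 : Int)) := by
  unfold pvPref
  simpa using pvPref_foldl row [] 0

theorem length_pvPref (row : List Int) : (pvPref row).length = row.length + 1 := by
  simp [pvPref_eq]

-- reading the prefix list at a clamped index is the zero count of the clamped prefix
theorem pvPref_getD (row : List Int) (t : Int) (ht : 0 ≤ t) :
    PySem.List.pyGetD (pvPref row) (min t (row.length : Int)) 0
      = ((row.take t.toNat).count 0 : Int) := by
  have h0u : (0:Int) ≤ min t (row.length : Int) := le_min ht (by positivity)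
  have hlt : min t (row.length : Int) < ((pvPref row).length : Int) := by
    rw [length_pvPref]; push_cast; omega
  rw [PySem.List.pyGetD_eq_getElem (pvPref row) 0 h0u hlt]
  simp only [pvPref_eq, List.getElem_map, List.getElem_range]
  by_cases h : (row.length : Int) ≤ t
  · have h1 : (min t (row.length : Int)).toNat = row.length := by omega
    have h2 : row.length ≤ t.toNat := by omega
    rw [h1, List.take_of_length_le h2, List.take_length]
  · have h1 : (min t (row.length : Int)).toNat = t.toNat := by omega
    rw [h1]

-- a zero occurs in row[a:b] iff the prefix zero counts at b and a differ
theorem pv_count_slice (r : List Int) (a b : Int) (h0 : 0 ≤ a) (hab : a ≤ b) :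
    ((0:Int) ∈ PySem.List.slice r (some a) (some b)) ↔
      ((r.take a.toNat).count 0 : Int) < ((r.take b.toNat).count 0 : Int) := by
  rw [PySem.List.slice_toNat r h0 (le_trans h0 hab)]
  have hsplit : r.take b.toNat
      = r.take a.toNat ++ (r.drop a.toNat).take (b.toNat - a.toNat) := by
    rw [← List.take_add]
    congr 1
    omega
  rw [hsplit, List.count_append, ← List.count_pos_iff]
  push_cast
  omega

theorem pv_bridge (r : List Int) (a b : Int) (h0 : 0 ≤ a) (hab : a ≤ b) :
    (0 < PySem.List.pyGetD (pvPref r) (min b (((pvPref r).length : Int) - 1)) 0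
        - PySem.List.pyGetD (pvPref r) (min a (((pvPref r).length : Int) - 1)) 0)
      ↔ ((0:Int) ∈ PySem.List.slice r (some a) (some b)) := by
  have hlen : ((pvPref r).length : Int) - 1 = (r.length : Int) := by
    rw [length_pvPref]; push_cast; ring
  rw [hlen, pvPref_getD r b (le_trans h0 hab), pvPref_getD r a h0,
    pv_count_slice r a b h0 hab]
  omega

-- A's two-branch dict bump is B's unconditional get-based bump
theorem pvRecordA_eq (d : PySem.Dict Int Int) (s : Int) :
    pvRecordA d s = d.insert s (d.getD s 0 + 1) := by
  unfold pvRecordA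
  by_cases h : d.contains s = true
  · simp [h]
  · rw [if_neg (by simpa using h),
      PySem.Dict.getD_of_not_contains d 0 (by simpa using h)]
    norm_num

-- the inner for-loop of A equals B's prefix-sum while loop, per apex
theorem pvInner_eq (g : List (List Int)) (i j kmax : Int)
    (hi : 0 ≤ i) (hkj : kmax ≤ j)
    (hki : i + kmax ≤ (g.length : Int) - 1)
    (hmin : min j (min ((g.length : Int) - i - 1) ((g.length : Int) - j - 1)) = kmax) :
    ∀ (d : Nat) (s : Int) (pair : PySem.Dict Int Int), 1 ≤ s → s ≤ kmax → (kmax - s).toNat = d →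
      pvInnerA g i j (PySem.List.pyRange s (1 + kmax) 1) (s - 1) pair =
        (if 0 < pvWhileB (g.map pvPref) i j kmax (s - 1) (kmax - (s - 1)).toNat then
           pvRecordA pair (pvWhileB (g.map pvPref) i j kmax (s - 1) (kmax - (s - 1)).toNat + 1)
         else pair) := by
  intro d
  induction d with
  | zero =>
    intro s pair hs1 hsk hd
    have hskm : s = kmax := by omega
    obtain ⟨r, hgA, hgB⟩ : ∃ r, PySem.List.pyGetD g (i + s) [] = r ∧
        PySem.List.pyGetD (g.map pvPref) (i + (s - 1) + 1) [] = pvPref r := by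
      refine ⟨g[(i + s).toNat]'(by omega), ?_, ?_⟩
      · exact PySem.List.pyGetD_eq_getElem g [] (by omega) (by omega)
      · rw [show i + (s - 1) + 1 = i + s from by ring]
        rw [PySem.List.pyGetD_eq_getElem (g.map pvPref) [] (by omega)
          (by simp only [List.length_map]; omega)]
        simp
    rw [PySem.List.pyRange_one_cons (show s < 1 + kmax by omega)]
    simp only [pvInnerA]
    rw [hgA]
    rw [show (kmax - (s - 1)).toNat = 0 + 1 from by omega]
    rw [pvWhileB_succ]
    rw [if_pos (show s - 1 < kmax by omega)]
    rw [hgB]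
    rw [show j - (s - 1) - 1 = j - s from by ring,
      show j + (s - 1) + 2 = j + s + 1 from by ring]
    have hb := pv_bridge r (j - s) (j + s + 1) (by omega) (by omega)
    by_cases hm : (0:Int) ∈ PySem.List.slice r (some (j - s)) (some (j + s + 1))
    · rw [if_neg (not_not_intro hm)]
      rw [if_pos (hb.mpr hm)]
      by_cases h1 : s = 1
      · rw [if_pos (show s - 1 = 0 by omega), if_neg (show ¬ (0:Int) < s - 1 by omega)]
      · rw [if_neg (show ¬ s - 1 = 0 by omega), if_pos (show (0:Int) < s - 1 by omega)]
    · rw [if_pos hm]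
      rw [if_neg (fun hlt => hm (hb.mp hlt))]
      rw [if_neg (show ¬ s < min j (min ((g.length : Int) - i - 1) ((g.length : Int) - j - 1))
        by rw [hmin]; omega)]
      rw [if_neg (show ¬ (s - 1 + 1 = 0) by omega)]
      rw [pvWhileB_zero]
      rw [show s - 1 + 1 = s from by ring]
      rw [if_pos (show (0:Int) < s by omega)]
  | succ d ih =>
    intro s pair hs1 hsk hd
    have hslt : s < kmax := by omega
    obtain ⟨r, hgA, hgB⟩ : ∃ r, PySem.List.pyGetD g (i + s) [] = r ∧
        PySem.List.pyGetD (g.map pvPref) (i + (s - 1) + 1) [] = pvPref r := by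
      refine ⟨g[(i + s).toNat]'(by omega), ?_, ?_⟩
      · exact PySem.List.pyGetD_eq_getElem g [] (by omega) (by omega)
      · rw [show i + (s - 1) + 1 = i + s from by ring]
        rw [PySem.List.pyGetD_eq_getElem (g.map pvPref) [] (by omega)
          (by simp only [List.length_map]; omega)]
        simp
    rw [PySem.List.pyRange_one_cons (show s < 1 + kmax by omega)]
    simp only [pvInnerA]
    rw [hgA]
    rw [show (kmax - (s - 1)).toNat = d + 1 + 1 from by omega]
    rw [pvWhileB_succ]
    rw [if_pos (show s - 1 < kmax by omega)]
    rw [hgB]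
    rw [show j - (s - 1) - 1 = j - s from by ring,
      show j + (s - 1) + 2 = j + s + 1 from by ring]
    have hb := pv_bridge r (j - s) (j + s + 1) (by omega) (by omega)
    by_cases hm : (0:Int) ∈ PySem.List.slice r (some (j - s)) (some (j + s + 1))
    · rw [if_neg (not_not_intro hm)]
      rw [if_pos (hb.mpr hm)]
      by_cases h1 : s = 1
      · rw [if_pos (show s - 1 = 0 by omega), if_neg (show ¬ (0:Int) < s - 1 by omega)]
      · rw [if_neg (show ¬ s - 1 = 0 by omega), if_pos (show (0:Int) < s - 1 by omega)]
    · rw [if_pos hm]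
      rw [if_neg (fun hlt => hm (hb.mp hlt))]
      rw [if_pos (show s < min j (min ((g.length : Int) - i - 1) ((g.length : Int) - j - 1))
        by rw [hmin]; omega)]
      have ihh := ih (s + 1) pair (by omega) (by omega) (by omega)
      rw [show s + 1 - 1 = s from by ring] at ihh
      rw [show (kmax - s).toNat = d + 1 from by omega] at ihh
      rw [show s - 1 + 1 = s from by ring]
      exact ihh

-- ===== VERDICT (by name: the statement is the Claim_ definition above) =====
theorem triangles_towards_North_spec : Claim_equal_triangles_towards_North := by
  intro g _ _
  unfold Spec_triangles_towards_North triangles_towards_North triangles_towards_North_alt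
  simp only [pv_foldl_pref, pv_foldl_snoc, List.nil_append]
  congr 1
  congr 1
  apply PySem.List.foldl_congr_mem
  intro acc i hi
  apply PySem.List.foldl_congr_mem
  intro acc2 j hj
  rw [PySem.List.mem_pyRange_one] at hi hj
  by_cases hguard : 1 ≤ PySem.List.pyGetD (PySem.List.pyGetD g i []) j 0
  · rw [if_pos hguard, if_pos hguard]
    set kmax : Int := min j (min ((g.length : Int) - 1 - i) ((g.length : Int) - 1 - j))
      with hkmax
    have hk1 : 1 ≤ kmax := by omega
    have h := pvInner_eq g i j kmax (by omega) (by omega) (by omega) (by omega)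
      (kmax - 1).toNat 1 acc2 (by norm_num) (by omega) rfl
    rw [show (1:Int) - 1 = 0 from by norm_num] at h
    rw [show kmax - (0:Int) = kmax from by ring] at h
    rw [h, pvRecordA_eq]
  · rw [if_neg hguard, if_neg hguard]
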